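-- pv_equiv track=rewrite | github.com/epam/badgerdoc | annotation/annotation/distribution/main.py | find_unassigned_pages
-- ===== SOURCE A (Python) =====
-- from typing import Dict, Iterable, List, Optional, Set, Tuple, Union
--
-- def find_unassigned_pages(
--     assigned_pages: list, pages_amount: int
-- ) -> List[int]:
--     """
--     Get all pages, that were not distributed.
--     """
--     return [
--         page
--         for page in range(1, pages_amount + 1)
--         if page not in assigned_pages
--     ]
-- ===== SOURCE B (Python) =====
-- def find_unassigned_pages(assigned_pages: list, pages_amount: int):
--     """Gap-scan: sort the distinct in-range assigned pages, then emit the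
--     runs of pages lying in the gaps between consecutive assigned pages —
--     no per-page membership test at all."""
--     blockers = sorted({p for p in assigned_pages if 1 <= p <= pages_amount})
--     result = []
--     prev = 0
--     for b in blockers:
--         result.extend(range(prev + 1, b))
--         prev = b
--     result.extend(range(prev + 1, pages_amount + 1))
--     return result
-- ===== Notes on version B (the rewrite author's own statement) =====
-- stated objective: faster
-- what changed: Replaces A's filter of range(1,N+1) by per-page list membership with a gap-scan: sort the distinct in-range assigned pages once and emit the runs of free pages between consecutive blockers, so no page is ever tested for membership.
import Mathlib
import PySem

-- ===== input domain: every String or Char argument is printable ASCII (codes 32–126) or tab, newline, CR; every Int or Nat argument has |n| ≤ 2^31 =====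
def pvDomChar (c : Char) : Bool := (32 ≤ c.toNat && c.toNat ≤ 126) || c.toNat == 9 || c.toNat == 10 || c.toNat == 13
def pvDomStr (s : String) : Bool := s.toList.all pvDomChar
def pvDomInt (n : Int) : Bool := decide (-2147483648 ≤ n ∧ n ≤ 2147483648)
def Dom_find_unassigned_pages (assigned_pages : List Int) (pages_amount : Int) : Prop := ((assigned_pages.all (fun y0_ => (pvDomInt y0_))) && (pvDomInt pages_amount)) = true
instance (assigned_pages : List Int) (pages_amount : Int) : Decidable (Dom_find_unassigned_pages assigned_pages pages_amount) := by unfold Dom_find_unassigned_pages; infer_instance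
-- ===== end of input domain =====

-- B replaces A's per-page membership filter with a gap-scan over the sorted distinct in-range assigned pages.

-- ===== PORT A =====
-- [page for page in range(1, pages_amount + 1) if page not in assigned_pages]
def find_unassigned_pages (assigned_pages : List Int) (pages_amount : Int) : List Int :=
  (PySem.List.pyRange 1 (pages_amount + 1) 1).filter
    (fun page => !(assigned_pages.contains page))

-- ===== PORT B =====
-- blockers = sorted({p for p in assigned_pages if 1 <= p <= pages_amount})
-- result = []; prev = 0
-- for b in blockers: result.extend(range(prev + 1, b)); prev = b
-- result.extend(range(prev + 1, pages_amount + 1)); return result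
def find_unassigned_pages_alt (assigned_pages : List Int) (pages_amount : Int) : List Int :=
  let blockers : List Int :=
    PySem.List.sorted
      (PySem.Set.ofList (assigned_pages.filter (fun p => 1 ≤ p && p ≤ pages_amount)))
      (fun x => x) false
  let st : List Int × Int :=
    blockers.foldl
      (fun (s : List Int × Int) b => (s.1 ++ PySem.List.pyRange (s.2 + 1) b 1, b))
      ([], 0)
  st.1 ++ PySem.List.pyRange (st.2 + 1) (pages_amount + 1) 1

-- ===== PRECONDITION & SPEC =====
def Spec_find_unassigned_pages (assigned_pages : List Int) (pages_amount : Int) (out : List Int) : Prop := out = find_unassigned_pages_alt assigned_pages pages_amount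
instance (assigned_pages : List Int) (pages_amount : Int) (out : List Int) : Decidable (Spec_find_unassigned_pages assigned_pages pages_amount out) := by unfold Spec_find_unassigned_pages; infer_instance

-- ===== CLAIM (what is proved, stated in full; the proofs are below) =====
def Claim_equal_find_unassigned_pages : Prop := ∀ (assigned_pages : List Int) (pages_amount : Int), Dom_find_unassigned_pages assigned_pages pages_amount → Spec_find_unassigned_pages assigned_pages pages_amount (find_unassigned_pages assigned_pages pages_amount)

-- ===== LEMMAS AND PROOFS =====

-- the gap-scan loop, written as the structural recursion it performs
def pvGaps (prev : Int) (bs : List Int) (n : Int) : List Int :=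
  match bs with
  | [] => PySem.List.pyRange (prev + 1) (n + 1) 1
  | b :: t => PySem.List.pyRange (prev + 1) b 1 ++ pvGaps b t n

-- B's foldl accumulates exactly pvGaps
theorem pvGaps_foldl (bs : List Int) (n : Int) : ∀ (acc : List Int) (prev : Int),
    (bs.foldl (fun (s : List Int × Int) b => (s.1 ++ PySem.List.pyRange (s.2 + 1) b 1, b))
        (acc, prev)).1
      ++ PySem.List.pyRange
          ((bs.foldl (fun (s : List Int × Int) b => (s.1 ++ PySem.List.pyRange (s.2 + 1) b 1, b))
              (acc, prev)).2 + 1) (n + 1) 1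
    = acc ++ pvGaps prev bs n := by
  induction bs with
  | nil => intro acc prev; simp [pvGaps]
  | cons b t ih =>
      intro acc prev
      simp only [List.foldl_cons]
      rw [ih (acc ++ PySem.List.pyRange (prev + 1) b 1) b]
      simp [pvGaps]

-- the gap-scan equals the filtered range, provided the blockers are strictly
-- increasing and lie in (prev, n]
theorem pvGaps_eq_filter (bs : List Int) (n : Int) : ∀ (prev : Int),
    bs.Pairwise (· < ·) → (∀ x ∈ bs, prev < x ∧ x ≤ n) →
    pvGaps prev bs n
      = (PySem.List.pyRange (prev + 1) (n + 1) 1).filter (fun x => !(bs.contains x)) := by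
  induction bs with
  | nil => intro prev _ _; simp [pvGaps]
  | cons b t ih =>
      intro prev hp hin
      obtain ⟨hb1, hb2⟩ := hin b (by simp)
      have hpt : t.Pairwise (· < ·) := hp.of_cons
      have hlt : ∀ x ∈ t, b < x := fun x hx => (List.pairwise_cons.mp hp).1 x hx
      have hint : ∀ x ∈ t, b < x ∧ x ≤ n := fun x hx => ⟨hlt x hx, (hin x (by simp [hx])).2⟩
      rw [pvGaps, ih b hpt hint]
      rw [PySem.List.pyRange_one_append (prev + 1) (b + 1) (n + 1) (by omega) (by omega),
          PySem.List.pyRange_one_append (prev + 1) b (b + 1) (by omega) (by omega),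
          PySem.List.pyRange_one_singleton]
      have h1 : (PySem.List.pyRange (prev + 1) b 1).filter (fun x => !((b :: t).contains x))
          = PySem.List.pyRange (prev + 1) b 1 := by
        rw [List.filter_eq_self]
        intro x hx
        have hxb : x < b := (PySem.List.mem_pyRange_one.mp hx).2
        have hnm : x ∉ b :: t := by
          simp only [List.mem_cons, not_or]
          exact ⟨by omega, fun hxt => absurd (hlt x hxt) (by omega)⟩
        simpa [List.contains_eq_mem] using hnm
      have h2 : List.filter (fun x => !((b :: t).contains x)) [b] = [] := by simp
      have h3 : (PySem.List.pyRange (b + 1) (n + 1) 1).filter (fun x => !((b :: t).contains x))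
          = (PySem.List.pyRange (b + 1) (n + 1) 1).filter (fun x => !(t.contains x)) := by
        apply List.filter_congr
        intro x hx
        have hxb : b < x := by
          have := (PySem.List.mem_pyRange_one.mp hx).1; omega
        have hiff : (x ∈ b :: t) ↔ x ∈ t := by
          simp only [List.mem_cons]
          constructor
          · rintro (h | h)
            · exact absurd h (by omega)
            · exact h
          · exact Or.inr
        simp [List.contains_eq_mem, hiff]
      rw [List.filter_append, List.filter_append, h1, h2, h3]
      simp

-- membership in B's blockers list
theorem pv_mem_blockers (assigned_pages : List Int) (pages_amount : Int) (x : Int) :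
    x ∈ PySem.List.sorted
          (PySem.Set.ofList (assigned_pages.filter (fun p => 1 ≤ p && p ≤ pages_amount)))
          (fun x => x) false
      ↔ x ∈ assigned_pages ∧ 1 ≤ x ∧ x ≤ pages_amount := by
  rw [PySem.List.mem_sorted, PySem.Set.mem_ofList, List.mem_filter]
  simp [and_comm]

theorem find_unassigned_pages_eq_alt (assigned_pages : List Int) (pages_amount : Int) :
    find_unassigned_pages assigned_pages pages_amount
      = find_unassigned_pages_alt assigned_pages pages_amount := by
  unfold find_unassigned_pages find_unassigned_pages_alt
  set bs := PySem.List.sorted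
      (PySem.Set.ofList (assigned_pages.filter (fun p => 1 ≤ p && p ≤ pages_amount)))
      (fun x => x) false with hbs
  have hpair : bs.Pairwise (· < ·) := PySem.List.sorted_ofList_pairwise_lt _
  have hin : ∀ x ∈ bs, (0 : Int) < x ∧ x ≤ pages_amount := by
    intro x hx
    have := (pv_mem_blockers assigned_pages pages_amount x).mp hx
    omega
  calc (PySem.List.pyRange 1 (pages_amount + 1) 1).filter
          (fun page => !(assigned_pages.contains page))
      = (PySem.List.pyRange 1 (pages_amount + 1) 1).filter (fun x => !(bs.contains x)) := by
        apply List.filter_congr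
        intro x hx
        have hx' := PySem.List.mem_pyRange_one.mp hx
        simp only [List.contains_eq_mem, Bool.not_eq_eq_eq_not, Bool.not_not, decide_eq_decide]
        rw [pv_mem_blockers]
        constructor
        · intro h; exact ⟨h, by omega⟩
        · exact And.left
    _ = pvGaps 0 bs pages_amount := by
        rw [pvGaps_eq_filter bs pages_amount 0 hpair hin]; norm_num
    _ = _ := by
        have h := pvGaps_foldl bs pages_amount [] 0
        rw [List.nil_append] at h
        exact h.symm

-- ===== VERDICT (by name: the statement is the Claim_ definition above) =====
theorem find_unassigned_pages_spec : Claim_equal_find_unassigned_pages := by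
  intro assigned_pages pages_amount _
  exact find_unassigned_pages_eq_alt assigned_pages pages_amount
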